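-- pv_equiv track=rewrite | github.com/dhr7va/GeeksforGeeks-POTD-solutions | 2024/April/12-04-2024.py | pairAndSum
-- ===== SOURCE A (Python) =====
-- def pairAndSum(n, arr):
--     #code here
--     out = 0
--     for i in range(32):
--         cnt = 0
--         for num in arr:
--             if num & (1 << i):
--                 cnt += 1
--         pairs = (cnt * (cnt - 1) // 2)
--         out += pairs * (1 << i)
--     return out
-- ===== SOURCE B (Python) =====
-- def pairAndSum(n, arr):
--     # One pass per element over its tail: add each pair's AND restricted to the
--     # 32-bit window A's bit loop (range(32)) defines.
--     MASK = (1 << 32) - 1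
--     out = 0
--     rest = arr
--     while rest:
--         x = rest[0]
--         rest = rest[1:]
--         for y in rest:
--             out += x & y & MASK
--     return out
-- ===== Notes on version B (the rewrite author's own statement) =====
-- stated objective: alternative
-- what changed: A decomposes the sum by bit position (32 rounds, each counting set bits and using C(cnt,2)); B directly sums arr[i] & arr[j] over every unordered pair, masked to the same 32-bit window A's range(32) loop defines.
import Mathlib
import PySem

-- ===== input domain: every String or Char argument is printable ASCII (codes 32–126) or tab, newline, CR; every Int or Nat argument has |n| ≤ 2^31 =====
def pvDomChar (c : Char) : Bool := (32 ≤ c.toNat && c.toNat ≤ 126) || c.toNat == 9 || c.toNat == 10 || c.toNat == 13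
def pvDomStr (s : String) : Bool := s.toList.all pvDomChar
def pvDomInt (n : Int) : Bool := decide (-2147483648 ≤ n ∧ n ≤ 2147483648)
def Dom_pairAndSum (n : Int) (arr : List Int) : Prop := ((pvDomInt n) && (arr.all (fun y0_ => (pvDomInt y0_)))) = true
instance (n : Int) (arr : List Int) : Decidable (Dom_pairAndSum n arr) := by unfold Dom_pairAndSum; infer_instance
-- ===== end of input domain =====

-- B replaces A's 32-round bit-counting pass by a direct sum over unordered pairs,
-- each pair contributing its AND restricted to the same 32-bit window A's bit loop defines.

-- ===== PORT A =====
-- 'for i in range(32)' / inner 'for num in arr' become foldls over the same state.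
def pairAndSum (n : Int) (arr : List Int) : Int :=
  (List.range 32).foldl (fun (out : Int) (i : Nat) =>
    let cnt : Int := arr.foldl (fun cnt num =>
      if PySem.Int.band num ((1 : Int) <<< i) ≠ 0 then cnt + 1 else cnt) 0
    let pairs := PySem.Int.floordiv (cnt * (cnt - 1)) 2
    out + pairs * ((1 : Int) <<< i)) 0

-- ===== PORT B =====
-- 'while rest: x = rest[0]; rest = rest[1:]; for y in rest: out += x & y & MASK'
def pairAndSumGo : List Int → Int → Int
  | [], out => out
  | x :: rest, out =>
      pairAndSumGo rest
        (rest.foldl (fun out y => out + PySem.Int.band (PySem.Int.band x y) 4294967295) out)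

def pairAndSum_alt (n : Int) (arr : List Int) : Int :=
  pairAndSumGo arr 0

-- ===== PRECONDITION & SPEC =====
def Spec_pairAndSum (n : Int) (arr : List Int) (out : Int) : Prop := out = pairAndSum_alt n arr
instance (n : Int) (arr : List Int) (out : Int) : Decidable (Spec_pairAndSum n arr out) := by unfold Spec_pairAndSum; infer_instance

-- ===== CLAIM (what is proved, stated in full; the proofs are below) =====
def Claim_equal_pairAndSum : Prop := ∀ (n : Int) (arr : List Int), Dom_pairAndSum n arr → Spec_pairAndSum n arr (pairAndSum n arr)

-- ===== LEMMAS AND PROOFS =====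

-- the low 32 bits of a Python int, as a Nat
def pvLow (z : Int) : Nat := (z % 4294967296).toNat

-- sign-aware bit of a Python int (two's complement)
def pvTb (z : Int) (k : Nat) : Bool :=
  if 0 ≤ z then z.toNat.testBit k else !((-z - 1).toNat.testBit k)

def pvCnt (i : Nat) (l : List Nat) : Nat := l.countP (fun w => w.testBit i)

def pvPairs : List Nat → Nat
  | [] => 0
  | x :: t => (t.map (fun y => x &&& y)).sum + pvPairs t

-- ---- pure Nat bit lemmas ----

theorem pvXorAdd : ∀ a t : Nat, t &&& a = t → (a ^^^ t) + t = a := by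
  intro a
  induction a using Nat.strong_induction_on with
  | _ a ih =>
    intro t ht
    rcases Nat.eq_zero_or_pos a with ha | ha
    · subst ha
      have : t = 0 := by simpa [Nat.and_zero] using ht.symm
      simp [this]
    · have h2 : t / 2 &&& a / 2 = t / 2 := by
        rw [← Nat.and_div_two, ht]
      have ihh := ih (a / 2) (Nat.div_lt_self ha (by norm_num)) (t / 2) h2
      have hA := Nat.testBit_and t a 0
      rw [ht] at hA
      simp only [Nat.testBit_zero] at hA
      have hq : t % 2 = 1 → a % 2 = 1 := by
        intro h1
        by_contra h2'
        simp [h1, h2'] at hA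
      have hX := Nat.testBit_xor a t 0
      simp only [Nat.testBit_zero] at hX
      have hxd : (a ^^^ t) / 2 = a / 2 ^^^ t / 2 := Nat.xor_div_two
      have e1 : a = 2 * (a / 2) + a % 2 := by omega
      have e3 : (a ^^^ t) = 2 * ((a / 2) ^^^ (t / 2)) + (a ^^^ t) % 2 := by
        rw [← hxd]; omega
      have hx2 : (a ^^^ t) % 2 + t % 2 = a % 2 := by
        rcases Nat.mod_two_eq_zero_or_one (a ^^^ t) with h0 | h0 <;>
          rcases Nat.mod_two_eq_zero_or_one a with hp | hp <;>
            rcases Nat.mod_two_eq_zero_or_one t with hr | hr <;>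
              simp [h0, hp, hr] at hX hq ⊢ <;> omega
      omega

theorem pvSubAnd (a m k : Nat) :
    (a - (a &&& m)).testBit k = (a.testBit k && !m.testBit k) := by
  have hsub : (a &&& m) &&& a = a &&& m := by
    rw [Nat.and_comm a m, Nat.and_assoc, Nat.and_self]
  have hx := pvXorAdd a (a &&& m) hsub
  have : a - (a &&& m) = a ^^^ (a &&& m) := by omega
  rw [this, Nat.testBit_xor, Nat.testBit_and]
  cases a.testBit k <;> cases m.testBit k <;> rfl

theorem pvDecompMod : ∀ (k w : Nat),
    w % 2 ^ k = ∑ i ∈ Finset.range k, (w.testBit i).toNat * 2 ^ i := by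
  intro k
  induction k with
  | zero => intro w; simp [Nat.mod_one]
  | succ k ih =>
    intro w
    rw [Finset.sum_range_succ, ← ih w, Nat.mod_pow_succ]
    have hb : (w.testBit k).toNat = w / 2 ^ k % 2 := by
      rw [Nat.testBit_eq_decide_div_mod_eq]
      rcases Nat.mod_two_eq_zero_or_one (w / 2 ^ k) with h | h <;> simp [h]
    rw [hb]; ring

theorem pvDecomp (w : Nat) (hw : w < 4294967296) :
    w = ∑ i ∈ Finset.range 32, (w.testBit i).toNat * 2 ^ i := by
  have := pvDecompMod 32 w
  rwa [Nat.mod_eq_of_lt (by norm_num; omega)] at this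

-- ---- band bridges ----

theorem pvLowTb (z : Int) (k : Nat) :
    (pvLow z).testBit k = (decide (k < 32) && pvTb z k) := by
  unfold pvLow pvTb
  by_cases hz : 0 ≤ z
  · have h1 : (z % 4294967296).toNat = z.toNat % 4294967296 := by omega
    have h2 : (4294967296 : Nat) = 2 ^ 32 := by norm_num
    rw [if_pos hz, h1, h2, Nat.testBit_mod_two_pow]
  · set m := (-z - 1).toNat with hm
    have h1 : (z % 4294967296).toNat = 2 ^ 32 - (m % 2 ^ 32 + 1) := by
      have : (2 : Nat) ^ 32 = 4294967296 := by norm_num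
      omega
    have h2 : m % 2 ^ 32 < 2 ^ 32 := Nat.mod_lt _ (by norm_num)
    rw [if_neg hz, h1, Nat.testBit_two_pow_sub_succ h2 k, Nat.testBit_mod_two_pow]
    by_cases hk : k < 32 <;> simp [hk]

theorem pvBandTb (x y : Int) (k : Nat) :
    pvTb (PySem.Int.band x y) k = (pvTb x k && pvTb y k) := by
  unfold PySem.Int.band
  by_cases hx : 0 ≤ x <;> by_cases hy : 0 ≤ y
  · rw [if_pos hx, if_pos hy]
    unfold pvTb
    rw [if_pos (Int.natCast_nonneg _), if_pos hx, if_pos hy, Int.toNat_natCast, Nat.testBit_and]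
  · rw [if_pos hx, if_neg hy]
    unfold pvTb
    rw [if_pos (Int.natCast_nonneg _), if_pos hx, if_neg hy, Int.toNat_natCast, pvSubAnd]
  · rw [if_neg hx, if_pos hy]
    unfold pvTb
    rw [if_pos (Int.natCast_nonneg _), if_neg hx, if_pos hy, Int.toNat_natCast, pvSubAnd]
    exact Bool.and_comm _ _
  · rw [if_neg hx, if_neg hy]
    unfold pvTb
    have hneg : ¬ (0 : Int) ≤ -(((-x - 1).toNat ||| (-y - 1).toNat : Nat) : Int) - 1 := by
      have := Int.natCast_nonneg ((-x - 1).toNat ||| (-y - 1).toNat); omega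
    rw [if_neg hneg, if_neg hx, if_neg hy]
    have h2 : (-(-(((-x - 1).toNat ||| (-y - 1).toNat : Nat) : Int) - 1) - 1).toNat
        = (-x - 1).toNat ||| (-y - 1).toNat := by
      have := Int.natCast_nonneg ((-x - 1).toNat ||| (-y - 1).toNat); omega
    rw [h2, Nat.testBit_or]
    cases (-x - 1).toNat.testBit k <;> cases (-y - 1).toNat.testBit k <;> rfl

theorem pvLowBand (x y : Int) :
    pvLow (PySem.Int.band x y) = pvLow x &&& pvLow y := by
  apply Nat.eq_of_testBit_eq
  intro k
  rw [Nat.testBit_and, pvLowTb, pvLowTb, pvLowTb, pvBandTb]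
  cases decide (k < 32) <;> cases pvTb x k <;> cases pvTb y k <;> rfl

theorem pvBandMask (z : Int) :
    PySem.Int.band z 4294967295 = ((pvLow z : Nat) : Int) := by
  unfold PySem.Int.band pvLow
  by_cases hz : 0 ≤ z
  · have h : (0 : Int) ≤ 4294967295 := by norm_num
    simp only [hz, h, if_true]
    have h2 : z.toNat &&& (4294967295 : Int).toNat = z.toNat % 4294967296 := by
      have := Nat.and_two_pow_sub_one_eq_mod z.toNat 32
      norm_num at this ⊢
      exact this
    rw [h2]
    congr 1
    omega
  · have h : (0 : Int) ≤ 4294967295 := by norm_num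
    simp only [hz, h, if_true, if_false]
    have h2 : (4294967295 : Int).toNat &&& (-z - 1).toNat = (-z - 1).toNat % 4294967296 := by
      have := Nat.and_two_pow_sub_one_eq_mod (-z - 1).toNat 32
      norm_num at this ⊢
      rw [Nat.and_comm]
      exact this
    rw [h2]
    congr 1
    omega

theorem pvBandPow (z : Int) (i : Nat) (hi : i < 32) :
    (PySem.Int.band z ((1 : Int) <<< i) ≠ 0) ↔ (pvLow z).testBit i = true := by
  have hpow : ((1 : Int) <<< i) = ((2 ^ i : Nat) : Int) := by
    rw [Int.shiftLeft_eq]; push_cast; ring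
  rw [hpow, pvLowTb]
  unfold PySem.Int.band pvTb
  by_cases hz : 0 ≤ z
  · rw [if_pos hz, if_pos (Int.natCast_nonneg _), if_pos hz, Int.toNat_natCast, Nat.and_two_pow]
    cases z.toNat.testBit i with
    | false => simp
    | true => simp [hi, (Nat.two_pow_pos i).ne']
  · rw [if_neg hz, if_pos (Int.natCast_nonneg _), if_neg hz, Int.toNat_natCast,
      Nat.and_comm, Nat.and_two_pow]
    cases (-z - 1).toNat.testBit i with
    | false => simp [hi, (Nat.two_pow_pos i).ne']
    | true => simp

-- ---- pure Nat combinatorial identity ----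

theorem pvMapSumSwap (t : List Nat) (g : Nat → Nat → Nat) :
    (t.map (fun y => ∑ i ∈ Finset.range 32, g i y)).sum
      = ∑ i ∈ Finset.range 32, (t.map (g i)).sum := by
  induction t with
  | nil => simp
  | cons x t ih => simp [ih, Finset.sum_add_distrib]

theorem pvMapIndicator (x : Nat) (i : Nat) (t : List Nat) :
    (t.map (fun y => (x.testBit i && y.testBit i).toNat * 2 ^ i)).sum
      = (x.testBit i).toNat * pvCnt i t * 2 ^ i := by
  induction t with
  | nil => simp [pvCnt]
  | cons y t ih =>
    simp only [List.map_cons, List.sum_cons, ih, pvCnt, List.countP_cons]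
    cases hy : y.testBit i <;> cases hx : x.testBit i <;> simp [hy, hx] <;> ring

theorem pvRowSum (x : Nat) (t : List Nat) (hx : x < 4294967296)
    (ht : ∀ w ∈ t, w < 4294967296) :
    (t.map (fun y => x &&& y)).sum
      = ∑ i ∈ Finset.range 32, (x.testBit i).toNat * pvCnt i t * 2 ^ i := by
  have hstep : ∀ y ∈ t, x &&& y = ∑ i ∈ Finset.range 32, (x.testBit i && y.testBit i).toNat * 2 ^ i := by
    intro y hy
    have hlt : x &&& y < 4294967296 := lt_of_le_of_lt Nat.and_le_left hx
    calc x &&& y = ∑ i ∈ Finset.range 32, ((x &&& y).testBit i).toNat * 2 ^ i := pvDecomp _ hlt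
      _ = ∑ i ∈ Finset.range 32, (x.testBit i && y.testBit i).toNat * 2 ^ i := by
          apply Finset.sum_congr rfl; intro i _; rw [Nat.testBit_and]
  rw [List.map_congr_left hstep, pvMapSumSwap]
  apply Finset.sum_congr rfl
  intro i _
  exact pvMapIndicator x i t

theorem pvChooseStep (c b : Nat) (hb : b ≤ 1) :
    (c + b).choose 2 = c.choose 2 + b * c := by
  interval_cases b
  · simp
  · rw [Nat.choose_succ_succ, Nat.choose_one_right]; ring

theorem pvMain : ∀ l : List Nat, (∀ w ∈ l, w < 4294967296) →
    pvPairs l = ∑ i ∈ Finset.range 32, (pvCnt i l).choose 2 * 2 ^ i := by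
  intro l
  induction l with
  | nil => simp [pvPairs, pvCnt]
  | cons x t ih =>
    intro h
    have hx : x < 4294967296 := h x (List.mem_cons_self)
    have ht : ∀ w ∈ t, w < 4294967296 := fun w hw => h w (List.mem_cons_of_mem x hw)
    have hcnt : ∀ i, pvCnt i (x :: t) = pvCnt i t + (x.testBit i).toNat := by
      intro i; cases hxi : x.testBit i <;> simp [pvCnt, List.countP_cons, hxi]
    calc pvPairs (x :: t)
        = (t.map (fun y => x &&& y)).sum + pvPairs t := rfl
      _ = ∑ i ∈ Finset.range 32, (x.testBit i).toNat * pvCnt i t * 2 ^ i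
            + ∑ i ∈ Finset.range 32, (pvCnt i t).choose 2 * 2 ^ i := by
          rw [pvRowSum x t hx ht, ih ht]
      _ = ∑ i ∈ Finset.range 32, (pvCnt i (x :: t)).choose 2 * 2 ^ i := by
          rw [← Finset.sum_add_distrib]
          apply Finset.sum_congr rfl
          intro i _
          rw [hcnt i, pvChooseStep (pvCnt i t) _ (by cases x.testBit i <;> simp)]
          ring

-- ---- relating the ports to the Nat layer ----

theorem pvFoldlAddInt {α : Type} (l : List α) (g : α → Int) (c : Int) :
    l.foldl (fun o y => o + g y) c = c + (l.map g).sum := by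
  induction l generalizing c with
  | nil => simp
  | cons x t ih => simp [ih, add_assoc]

theorem pvFoldlCount {α : Type} (l : List α) (p : α → Prop) [DecidablePred p] (c : Int) :
    l.foldl (fun cnt num => if p num then cnt + 1 else cnt) c
      = c + ((l.countP (fun x => decide (p x)) : Nat) : Int) := by
  induction l generalizing c with
  | nil => simp
  | cons x t ih =>
    by_cases hx : p x <;> simp [List.countP_cons, hx, ih] <;> push_cast <;> ring

theorem pvFoldlRange (k : Nat) (f : Nat → Int) :
    (List.range k).foldl (fun o i => o + f i) 0 = ∑ i ∈ Finset.range k, f i := by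
  induction k with
  | zero => simp
  | succ k ih => rw [List.range_succ, List.foldl_append, Finset.sum_range_succ, ih]; rfl

theorem pvCastChoose (c : Nat) :
    PySem.Int.floordiv (((c : Nat) : Int) * (((c : Nat) : Int) - 1)) 2 = ((c.choose 2 : Nat) : Int) := by
  have h1 : ((c : Nat) : Int) * (((c : Nat) : Int) - 1) = ((c * (c - 1) : Nat) : Int) := by
    cases c with
    | zero => simp
    | succ c => push_cast; ring
  rw [Nat.choose_two_right]
  show Int.fdiv _ _ = _
  rw [h1, Int.fdiv_eq_ediv]
  simp only [show ((0:Int) ≤ 2) from by norm_num, true_or, if_true, sub_zero]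
  omega

theorem pvAchar (n : Int) (arr : List Int) :
    pairAndSum n arr
      = ∑ i ∈ Finset.range 32, ((pvCnt i (arr.map pvLow)).choose 2 : Int) * 2 ^ i := by
  rw [show pairAndSum n arr
      = (List.range 32).foldl (fun out i => out + (fun (i : Nat) =>
          PySem.Int.floordiv
            ((arr.foldl (fun cnt num => if PySem.Int.band num ((1 : Int) <<< i) ≠ 0 then cnt + 1 else cnt) 0)
              * ((arr.foldl (fun cnt num => if PySem.Int.band num ((1 : Int) <<< i) ≠ 0 then cnt + 1 else cnt) 0) - 1)) 2
            * ((1 : Int) <<< i)) i) 0 from rfl,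
    pvFoldlRange]
  apply Finset.sum_congr rfl
  intro i hi
  have hi32 : i < 32 := Finset.mem_range.mp hi
  have hcnt : arr.foldl (fun cnt num => if PySem.Int.band num ((1 : Int) <<< i) ≠ 0 then cnt + 1 else cnt) (0 : Int)
      = ((pvCnt i (arr.map pvLow) : Nat) : Int) := by
    rw [pvFoldlCount arr (fun num => PySem.Int.band num ((1 : Int) <<< i) ≠ 0) 0, zero_add]
    congr 1
    unfold pvCnt
    rw [List.countP_map]
    apply List.countP_congr
    intro z _
    simp only [decide_eq_true_eq, Function.comp]
    exact pvBandPow z i hi32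
  rw [hcnt, pvCastChoose]
  rw [Int.shiftLeft_eq]
  push_cast
  ring

theorem pvSumCast (l : List Int) (g : Int → Nat) :
    (l.map (fun y => ((g y : Nat) : Int))).sum = (((l.map g).sum : Nat) : Int) := by
  induction l with
  | nil => simp
  | cons z s ih => simp only [List.map_cons, List.sum_cons, ih]; push_cast; ring

theorem pvBchar (arr : List Int) (out : Int) :
    pairAndSumGo arr out = out + ((pvPairs (arr.map pvLow) : Nat) : Int) := by
  induction arr generalizing out with
  | nil => simp [pairAndSumGo, pvPairs]
  | cons x t ih =>
    rw [pairAndSumGo, ih]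
    rw [pvFoldlAddInt t (fun y => PySem.Int.band (PySem.Int.band x y) 4294967295) out]
    have hmap : t.map (fun y => PySem.Int.band (PySem.Int.band x y) 4294967295)
        = t.map (fun y => (((fun y => pvLow x &&& pvLow y) y : Nat) : Int)) := by
      apply List.map_congr_left
      intro y _
      rw [pvBandMask, pvLowBand]
    rw [hmap, pvSumCast t (fun y => pvLow x &&& pvLow y)]
    have hpp : pvPairs ((x :: t).map pvLow)
        = ((t.map pvLow).map (fun w => pvLow x &&& w)).sum + pvPairs (t.map pvLow) := rfl
    have hmm : t.map (fun y => pvLow x &&& pvLow y)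
        = (t.map pvLow).map (fun w => pvLow x &&& w) := by
      simp [List.map_map, Function.comp]
    rw [hmm, hpp]
    push_cast
    ring

-- ===== VERDICT (by name: the statement is the Claim_ definition above) =====
theorem pairAndSum_spec : Claim_equal_pairAndSum := by
  intro n arr _
  unfold Spec_pairAndSum
  rw [pvAchar, pairAndSum_alt, pvBchar, zero_add]
  have hbound : ∀ w ∈ arr.map pvLow, w < 4294967296 := by
    intro w hw
    rcases List.mem_map.mp hw with ⟨z, _, rfl⟩
    unfold pvLow
    omega
  rw [pvMain (arr.map pvLow) hbound]
  push_cast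
  rfl
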